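-- pv_equiv track=rewrite | github.com/not-mike-smith/DataStructures | test_rankedAvlTree.py | perfect_binary_list
-- ===== SOURCE A (Python) =====
-- def perfect_binary_list(height):
--     ret = [1]
--     for count in range(1, height):
--         ret = [i*2 for i in ret]
--         j = 1
--         while j < 2 * ret[0]:
--             ret.append(j)
--             j += 2
--     return ret
-- ===== SOURCE B (Python) =====
-- def perfect_binary_list(height):
--     if height < 2:
--         return [1]
--     out = [0] * ((1 << height) - 1)
--     i = 0
--     for k in range(height):
--         first = 1 << (height - 1 - k)
--         step = 1 << (height - k)
--         cnt = 1 << k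
--         out[i:i + cnt] = range(first, first + step * cnt, step)
--         i += cnt
--     return out
-- ===== Notes on version B (the rewrite author's own statement) =====
-- stated objective: alternative
-- what changed: B preallocates the full output of length 2^h-1 and writes each tree level directly as an arithmetic progression (first=2^(h-1-k), step=2^(h-k), 2^k terms) via slice assignment, instead of A's repeated doubling of the whole accumulated array plus an odd-appending while loop per pass.
import Mathlib
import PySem

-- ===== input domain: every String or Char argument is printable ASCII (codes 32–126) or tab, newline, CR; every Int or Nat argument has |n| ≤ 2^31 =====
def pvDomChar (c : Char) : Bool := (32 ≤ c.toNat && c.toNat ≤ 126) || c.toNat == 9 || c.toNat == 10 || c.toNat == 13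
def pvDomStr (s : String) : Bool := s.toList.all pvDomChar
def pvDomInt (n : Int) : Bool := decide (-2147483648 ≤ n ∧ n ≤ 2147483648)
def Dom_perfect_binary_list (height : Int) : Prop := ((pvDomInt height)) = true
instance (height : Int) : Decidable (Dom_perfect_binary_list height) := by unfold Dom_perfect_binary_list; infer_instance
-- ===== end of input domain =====

-- B preallocates the output and fills each tree level directly as an arithmetic progression
-- (slice assignment), instead of A's repeated doubling-and-appending of the whole array; same return value.

-- ===== PORT A =====
-- A's inner while loop: append j, j += 2 while j < b.  The Python bound '2 * ret[0]' is
-- re-read each iteration but index 0 is unchanged by the appends (and ret is never empty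
-- during A's run), so it is passed in once as b; pyGetD at index 0 is exact here.
def pbAppendOdds (ret : List Int) (b j : Int) : List Int :=
  if j < b then pbAppendOdds (ret ++ [j]) b (j + 2) else ret
termination_by (b - j).toNat
decreasing_by omega

def perfect_binary_list (height : Int) : List Int :=
  (PySem.List.pyRange 1 height 1).foldl
    (fun ret _count =>
      let ret2 := ret.map (fun i => i * 2)
      pbAppendOdds ret2 (2 * PySem.List.pyGetD ret2 0 0) 1)
    [1]

-- ===== PORT B =====
-- '1 << n' ported as 2 ^ n (exact: the shift amounts occurring are nonnegative for height ≥ 2).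
-- 'out[i:i+cnt] = range(...)' is Python slice assignment; with 0 ≤ i ≤ i+cnt ≤ len(out), which
-- holds throughout this loop, it is exactly take/drop splicing as written here.
def pbFill (height : Int) (st : List Int × Int) (k : Int) : List Int × Int :=
  let out := st.1
  let i := st.2
  let first : Int := 2 ^ (height - 1 - k).toNat
  let step : Int := 2 ^ (height - k).toNat
  let cnt : Int := 2 ^ k.toNat
  (out.take i.toNat ++ PySem.List.pyRange first (first + step * cnt) step
     ++ out.drop (i + cnt).toNat,
   i + cnt)

def perfect_binary_list_alt (height : Int) : List Int :=
  if height < 2 then [1]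
  else
    ((PySem.List.pyRange 0 height 1).foldl (pbFill height)
      (List.replicate ((2 ^ height.toNat : Int) - 1).toNat 0, 0)).1

-- ===== PRECONDITION & SPEC =====
def Spec_perfect_binary_list (height : Int) (out : List Int) : Prop := out = perfect_binary_list_alt height
instance (height : Int) (out : List Int) : Decidable (Spec_perfect_binary_list height out) := by unfold Spec_perfect_binary_list; infer_instance

-- ===== CLAIM (what is proved, stated in full; the proofs are below) =====
def Claim_equal_perfect_binary_list : Prop := ∀ (height : Int), Dom_perfect_binary_list height → Spec_perfect_binary_list height (perfect_binary_list height)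

-- ===== LEMMAS AND PROOFS =====

-- [j, j+2, …] with n terms
def oddsFrom : Nat → Int → List Int
  | 0, _ => []
  | n + 1, j => j :: oddsFrom n (j + 2)

theorem oddsFrom_eq_map (n : Nat) : ∀ j : Int,
    oddsFrom n j = (List.range n).map (fun i : Nat => j + 2 * (i : Int)) := by
  induction n with
  | zero => intro j; simp [oddsFrom]
  | succ n ih =>
    intro j
    rw [List.range_succ_eq_map, List.map_cons, List.map_map]
    simp only [oddsFrom]
    congr 1
    · simp
    · rw [ih (j + 2)]
      apply List.map_congr_left
      intro a _
      simp only [Function.comp, Nat.succ_eq_add_one]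
      push_cast
      ring

theorem pbAppendOdds_eq (n : Nat) : ∀ (j : Int) (ret : List Int),
    pbAppendOdds ret (j + 2 * n - 1) j = ret ++ oddsFrom n j := by
  induction n with
  | zero =>
    intro j ret
    rw [pbAppendOdds, if_neg (by push_cast; omega)]
    simp [oddsFrom]
  | succ n ih =>
    intro j ret
    rw [pbAppendOdds]
    have hlt : j < j + 2 * (n + 1 : Nat) - 1 := by push_cast; omega
    rw [if_pos hlt]
    have : (j + 2 * ((n : Int) + 1) - 1) = (j + 2) + 2 * n - 1 := by ring
    push_cast
    rw [this]
    have := ih (j + 2) (ret ++ [j])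
    push_cast at this
    rw [this, oddsFrom]
    simp

-- the list A holds after c iterations of its outer loop
def P : Nat → List Int
  | 0 => [1]
  | c + 1 => (P c).map (fun i => i * 2) ++ oddsFrom (2 ^ (c + 1)) 1

theorem P_head : ∀ c : Nat, ∃ t, P c = ((2 : Int) ^ c) :: t := by
  intro c
  induction c with
  | zero => exact ⟨[], rfl⟩
  | succ c ih =>
    obtain ⟨t, ht⟩ := ih
    refine ⟨t.map (fun i => i * 2) ++ oddsFrom (2 ^ (c + 1)) 1, ?_⟩
    simp [P, ht, pow_succ]

theorem A_body_P (c : Nat) :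
    (fun (ret : List Int) (_count : Int) =>
      let ret2 := ret.map (fun i => i * 2)
      pbAppendOdds ret2 (2 * PySem.List.pyGetD ret2 0 0) 1) (P c) 0 = P (c + 1) := by
  obtain ⟨t, ht⟩ := P_head c
  simp only [ht, List.map_cons]
  have hget : PySem.List.pyGetD (((2:Int) ^ c * 2) :: t.map (fun i => i * 2)) 0 0
      = (2:Int) ^ c * 2 := by
    simp [PySem.List.pyGetD, PySem.List.pyGet?, PySem.List.pyIdx?]
  rw [hget]
  have hb : 2 * ((2:Int) ^ c * 2) = 1 + 2 * ((2 : Nat) ^ (c + 1) : Nat) - 1 := by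
    push_cast
    ring
  rw [hb, pbAppendOdds_eq]
  simp [P, ht]

theorem A_foldl (l : List Int) : ∀ c : Nat,
    l.foldl (fun (ret : List Int) (_count : Int) =>
      let ret2 := ret.map (fun i => i * 2)
      pbAppendOdds ret2 (2 * PySem.List.pyGetD ret2 0 0) 1) (P c) = P (c + l.length) := by
  induction l with
  | nil => intro c; simp
  | cons x xs ih =>
    intro c
    simp only [List.foldl_cons]
    have hb := A_body_P c
    simp only at hb ⊢
    rw [hb, ih (c + 1)]
    congr 1
    simp
    omega

theorem A_eq_P (height : Int) : perfect_binary_list height = P ((height - 1).toNat) := by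
  unfold perfect_binary_list
  have h0 : ([1] : List Int) = P 0 := rfl
  rw [h0, A_foldl]
  congr 1
  simp [PySem.List.length_pyRange_one]

-- exact element count of range(a, a + s*m, s) for s > 0
theorem pyRange_mul (a s : Int) (m : Nat) (hs : 0 < s) :
    PySem.List.pyRange a (a + s * m) s = (List.range m).map (fun i : Nat => a + s * (i : Int)) := by
  have hc : (if a < a + s * (m : Int) then ((a + s * (m : Int) - a + s - 1) / s).toNat else 0) = m := by
    rcases Nat.eq_zero_or_pos m with hm | hm
    · subst hm
      simp
    · have hlt : a < a + s * (m : Int) := by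
        have : (0:Int) < s * (m : Int) := by positivity
        omega
      have h1 : a + s * (m : Int) - a + s - 1 = (s - 1) + (m : Int) * s := by ring
      rw [if_pos hlt, h1, Int.add_mul_ediv_right _ _ (by omega : s ≠ 0),
        Int.ediv_eq_zero_of_lt (by omega) (by omega)]
      omega
  rw [PySem.List.pyRange_of_pos _ _ hs, hc]

-- level k of the height-n tree, as B emits it
def lvl (n k : Nat) : List Int :=
  (List.range (2 ^ k)).map (fun i : Nat => (2:Int) ^ (n - 1 - k) + 2 ^ (n - k) * (i : Int))

def C (n : Nat) : List Int := (List.range n).flatMap (lvl n)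

theorem lvl_last (n : Nat) : lvl (n + 1) n = oddsFrom (2 ^ n) 1 := by
  rw [oddsFrom_eq_map]
  unfold lvl
  apply List.map_congr_left
  intro i _
  simp

theorem lvl_double {n k : Nat} (hk : k < n) :
    lvl (n + 1) k = (lvl n k).map (fun i => i * 2) := by
  unfold lvl
  rw [List.map_map]
  apply List.map_congr_left
  intro i _
  simp only [Function.comp]
  have e1 : n + 1 - 1 - k = (n - 1 - k) + 1 := by omega
  have e2 : n + 1 - k = (n - k) + 1 := by omega
  rw [e1, e2, pow_succ, pow_succ]
  ring

theorem C_eq_P : ∀ n : Nat, C (n + 1) = P n := by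
  intro n
  induction n with
  | zero => decide
  | succ n ih =>
    unfold C
    rw [List.range_succ, List.flatMap_append]
    have h1 : (List.range (n + 1)).flatMap (lvl (n + 2)) = (P n).map (fun i => i * 2) := by
      have he : ∀ k ∈ List.range (n + 1), lvl (n + 2) k = (lvl (n + 1) k).map (fun i => i * 2) := by
        intro k hk
        rw [List.mem_range] at hk
        exact lvl_double (by omega)
      rw [List.flatMap_congr he, ← List.map_flatMap, ← C, ih]
    rw [h1]
    simp only [List.flatMap_cons, List.flatMap_nil, List.append_nil]
    rw [lvl_last]
    rfl

def Cp (n k : Nat) : List Int := (List.range k).flatMap (lvl n)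

theorem lvl_length (n k : Nat) : (lvl n k).length = 2 ^ k := by
  simp [lvl]

theorem Cp_length (n : Nat) : ∀ k : Nat, (Cp n k).length = 2 ^ k - 1 := by
  intro k
  induction k with
  | zero => simp [Cp]
  | succ k ih =>
    unfold Cp at ih ⊢
    rw [List.range_succ, List.flatMap_append]
    simp only [List.flatMap_cons, List.flatMap_nil, List.append_nil, List.length_append,
      ih, lvl_length]
    have : 1 ≤ 2 ^ k := Nat.one_le_two_pow
    rw [pow_succ]
    omega

theorem fill_invariant (n : Nat) : ∀ k : Nat, k ≤ n →
    (List.range k).foldl (fun st (j : Nat) => pbFill (n : Int) st (j : Int))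
      (List.replicate (2 ^ n - 1) (0 : Int), (0 : Int))
    = (Cp n k ++ List.replicate (2 ^ n - 2 ^ k) (0 : Int), ((2 : Int) ^ k) - 1) := by
  intro k
  induction k with
  | zero => intro _; simp [Cp]
  | succ k ih =>
    intro hk1
    have hk : k < n := by omega
    rw [List.range_succ, List.foldl_append, ih (by omega)]
    simp only [List.foldl_cons, List.foldl_nil]
    unfold pbFill
    have hp : (((2 : Nat) ^ k : Nat) : Int) = (2 : Int) ^ k := by push_cast; ring
    have h1p : 1 ≤ (2 : Nat) ^ k := Nat.one_le_two_pow
    have e0 : ((k : Int)).toNat = k := by omega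
    have e1 : ((n : Int) - 1 - (k : Int)).toNat = n - 1 - k := by omega
    have e2 : ((n : Int) - (k : Int)).toNat = n - k := by omega
    have eI : ((2 : Int) ^ k - 1).toNat = 2 ^ k - 1 := by omega
    simp only [e0, e1, e2]
    have htake : (Cp n k ++ List.replicate (2 ^ n - 2 ^ k) (0 : Int)).take
        (((2 : Int) ^ k - 1).toNat) = Cp n k := by
      rw [eI, ← Cp_length n k, List.take_left]
    have hpow : (2 : Nat) ^ k ≤ 2 ^ n := Nat.pow_le_pow_right (by omega) (by omega)
    have hdrop : (Cp n k ++ List.replicate (2 ^ n - 2 ^ k) (0 : Int)).drop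
        (((2 : Int) ^ k - 1 + 2 ^ k).toNat)
        = List.replicate (2 ^ n - 2 ^ (k + 1)) (0 : Int) := by
      have eJ : ((2 : Int) ^ k - 1 + 2 ^ k).toNat = (Cp n k).length + 2 ^ k := by
        rw [Cp_length n k]
        omega
      
      rw [eJ, List.drop_append, List.drop_replicate,
        List.drop_eq_nil_of_le (Nat.le_add_right _ _), List.nil_append]
      congr 1
      have hlen := Cp_length n k
      have hsucc : (2 : Nat) ^ (k + 1) = 2 ^ k + 2 ^ k := by rw [pow_succ]; omega
      omega
    have hrange : PySem.List.pyRange ((2 : Int) ^ (n - 1 - k))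
        ((2 : Int) ^ (n - 1 - k) + 2 ^ (n - k) * 2 ^ k) ((2 : Int) ^ (n - k))
        = lvl n k := by
      exact pyRange_mul _ _ _ (by positivity)
    simp only [htake, hdrop, hrange]
    simp only [Prod.mk.injEq]
    constructor
    · unfold Cp
      rw [List.range_succ, List.flatMap_append]
      simp [List.append_assoc]
    · rw [pow_succ]
      ring

theorem B_eq_P (height : Int) (h2 : 2 ≤ height) :
    perfect_binary_list_alt height = P (height.toNat - 1) := by
  obtain ⟨n, hn⟩ : ∃ n : Nat, height = (n : Int) := ⟨height.toNat, by omega⟩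
  subst hn
  have h2n : 2 ≤ n := by omega
  unfold perfect_binary_list_alt
  rw [if_neg (by omega)]
  rw [PySem.List.pyRange_zero_natCast, List.foldl_map]
  simp only [Int.toNat_natCast]
  have hrep : (((2 : Int) ^ n - 1)).toNat = 2 ^ n - 1 := by
    have hp : (((2 : Nat) ^ n : Nat) : Int) = (2 : Int) ^ n := by push_cast; ring
    have h1p : 1 ≤ (2 : Nat) ^ n := Nat.one_le_two_pow
    omega
  rw [hrep, fill_invariant n n (le_refl n)]
  simp only [Nat.sub_self, List.replicate_zero, List.append_nil]
  have : Cp n n = C n := rfl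
  rw [this, ← C_eq_P (n - 1)]
  congr 1
  omega

-- ===== VERDICT (by name: the statement is the Claim_ definition above) =====
theorem perfect_binary_list_spec : Claim_equal_perfect_binary_list := by
  intro height _
  unfold Spec_perfect_binary_list
  rcases lt_or_ge height 2 with h | h
  · have hA : perfect_binary_list height = [1] := by
      unfold perfect_binary_list
      rw [PySem.List.pyRange_one_eq_nil (by omega)]
      rfl
    have hB : perfect_binary_list_alt height = [1] := by
      unfold perfect_binary_list_alt
      rw [if_pos h]
    rw [hA, hB]
  · rw [A_eq_P, B_eq_P height h]
    congr 1
    omega
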